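-- pv_equiv track=rewrite | github.com/bhchance/AdventOfCode | src/adventofcode/year2020/day6/problem2.py | solution
-- ===== SOURCE A (Python) =====
-- def solution(input_string):
--     return sum(
--         map(
--             len,
--             (
--                 set.intersection(*[set(y) for y in x.split()])
--                 for x in input_string.split("\n\n")
--             ),
--         )
--     )
-- ===== SOURCE B (Python) =====
-- def solution(input_string):
--     total = 0
--     for group in input_string.split("\n\n"):
--         lines = group.split()
--         counts = {}
--         for line in lines:
--             for ch in dict.fromkeys(line):
--                 counts[ch] = counts.get(ch, 0) + 1
--         total += sum(1 for v in counts.values() if v == len(lines))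
--     return total
-- ===== Notes on version B (the rewrite author's own statement) =====
-- stated objective: alternative
-- what changed: B replaces per-group building of one set per person and folding set.intersection over them by a single character-count dictionary per group: each person's distinct characters bump a counter, and the group's contribution is the number of characters whose count equals the number of persons; Pre_ excludes inputs with an empty/whitespace-only group, on which A raises TypeError.
import Mathlib
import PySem

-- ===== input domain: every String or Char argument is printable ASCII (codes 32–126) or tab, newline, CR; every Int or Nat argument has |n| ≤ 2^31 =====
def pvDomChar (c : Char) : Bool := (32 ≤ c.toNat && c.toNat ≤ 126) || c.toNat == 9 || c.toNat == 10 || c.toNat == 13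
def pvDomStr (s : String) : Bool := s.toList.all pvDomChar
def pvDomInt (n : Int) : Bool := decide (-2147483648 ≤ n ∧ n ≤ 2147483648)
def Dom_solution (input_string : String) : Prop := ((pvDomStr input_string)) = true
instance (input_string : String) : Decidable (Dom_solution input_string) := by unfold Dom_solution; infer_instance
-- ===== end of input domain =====

-- B replaces the per-group fold of set.intersection over one set per person by a single
-- character-count dictionary per group (alternative decomposition, same asymptotic cost).

-- ===== PORT A =====
-- per group x: set.intersection(*[set(y) for y in x.split()]), then len
def groupA (g : List Char) : Int :=
  match (PySem.Chars.split₀ g).map (fun y => PySem.Set.ofList y) with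
  | [] => 0  -- Python raises TypeError here (intersection of no sets); excluded by Pre_solution
  | s :: rest => PySem.Set.len (rest.foldl PySem.Set.inter s)

def solution (input_string : String) : Int :=
  ((PySem.Chars.splitOn input_string.toList "\n\n".toList).map groupA).sum

-- ===== PORT B =====
-- per group: count, per character, in how many of the group's words it occurs
-- (duplicates inside one word collapsed by dict.fromkeys = PySem.List.dedup);
-- contribution = number of characters counted in every word.
def groupB (g : List Char) : Int :=
  let lines := PySem.Chars.split₀ g
  let counts := lines.foldl
    (fun d line => (PySem.List.dedup line).foldl (fun d ch => d.modify ch 0 (· + 1)) d)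
    PySem.Dict.empty
  (counts.values.map (fun v => if v = (lines.length : Int) then (1 : Int) else 0)).sum

def solution_alt (input_string : String) : Int :=
  (PySem.Chars.splitOn input_string.toList "\n\n".toList).foldl
    (fun acc g => acc + groupB g) 0

-- ===== PRECONDITION & SPEC =====
-- Pre_ excludes exactly the inputs with an empty or whitespace-only group, on which
-- Python A raises TypeError (set.intersection with no arguments).
def Pre_solution (input_string : String) : Prop :=
  ∀ g ∈ PySem.Chars.splitOn input_string.toList "\n\n".toList, PySem.Chars.split₀ g ≠ []
instance (input_string : String) : Decidable (Pre_solution input_string) := by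
  unfold Pre_solution; infer_instance

def pvWitness_solution : String := "ab\nbc\n\nb"

def Spec_solution (input_string : String) (out : Int) : Prop := out = solution_alt input_string
instance (input_string : String) (out : Int) : Decidable (Spec_solution input_string out) := by
  unfold Spec_solution; infer_instance

-- ===== CLAIM (what is proved, stated in full; the proofs are below) =====
def Claim_equal_solution : Prop := ∀ (input_string : String), Dom_solution input_string → Pre_solution input_string → Spec_solution input_string (solution input_string)


-- ===== LEMMAS AND PROOFS =====

-- membership in the folded intersection
lemma mem_foldl_inter (ts : List (PySem.Set Char)) (s : PySem.Set Char) (c : Char) :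
    c ∈ ts.foldl PySem.Set.inter s ↔ c ∈ s ∧ ∀ t ∈ ts, c ∈ t := by
  induction ts generalizing s with
  | nil => simp
  | cons t ts ih =>
    simp only [List.foldl_cons, ih, PySem.Set.mem_inter, List.mem_cons]
    constructor
    · rintro ⟨⟨hs, ht⟩, hall⟩
      exact ⟨hs, by rintro u (rfl | hu); exact ht; exact hall u hu⟩
    · rintro ⟨hs, hall⟩
      exact ⟨⟨hs, hall t (Or.inl rfl)⟩, fun u hu => hall u (Or.inr hu)⟩

lemma nodup_foldl_inter (ts : List (PySem.Set Char)) (s : PySem.Set Char) (hs : s.Nodup) :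
    (ts.foldl PySem.Set.inter s).Nodup := by
  induction ts generalizing s with
  | nil => exact hs
  | cons t ts ih => exact ih _ (PySem.Set.nodup_inter s t hs)

-- counting a character in the concatenation of the deduplicated words
lemma count_flatMap_dedup (lines : List (List Char)) (c : Char) :
    (lines.flatMap PySem.List.dedup).count c
      = lines.countP (fun l => decide (c ∈ l)) := by
  induction lines with
  | nil => simp
  | cons l ls ih =>
    simp only [List.flatMap_cons, List.count_append, List.countP_cons, ih,
      PySem.List.dedup_eq_ofList]
    by_cases h : c ∈ l
    · have h1 : 0 < (PySem.Set.ofList l).count c :=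
        List.count_pos_iff.mpr ((PySem.Set.mem_ofList l c).mpr h)
      have h2 : (PySem.Set.ofList l).count c ≤ 1 :=
        List.nodup_iff_count_le_one.mp (PySem.Set.nodup_ofList l) c
      simp only [h, decide_true, if_true]
      omega
    · have h0 : (PySem.Set.ofList l).count c = 0 :=
        List.count_eq_zero.mpr (by simp [h])
      simp [h, h0]

-- the per-group values agree (also when the group has no words: both give 0)
lemma group_eq (g : List Char) : groupA g = groupB g := by
  rcases hl : PySem.Chars.split₀ g with _ | ⟨l0, rest⟩
  · simp [groupA, groupB, hl, PySem.Dict.empty, PySem.Dict.values]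
  · have hB : groupB g
        = ((PySem.Dict.counter ((l0 :: rest).flatMap PySem.List.dedup)).values.map
            (fun v => if v = (((l0 :: rest) : List (List Char)).length : Int) then (1 : Int) else 0)).sum := by
      simp only [groupB, hl, PySem.Dict.counter, List.foldl_flatMap]
    rw [hB]
    have hvals : (PySem.Dict.counter ((l0 :: rest).flatMap PySem.List.dedup)).values
        = (PySem.Set.ofList ((l0 :: rest).flatMap PySem.List.dedup)).map
            (fun k => (((l0 :: rest).flatMap PySem.List.dedup).count k : Int)) := by
      simp [PySem.Dict.values, PySem.Dict.items_counter, List.map_map, Function.comp]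
    rw [hvals, List.map_map]
    have hsum := PySem.List.sum_map_ite_one_zero
      (fun k => decide ((((l0 :: rest).flatMap PySem.List.dedup).count k : Int)
        = (((l0 :: rest) : List (List Char)).length : Int)))
      (PySem.Set.ofList ((l0 :: rest).flatMap PySem.List.dedup))
    simp only [decide_eq_true_eq] at hsum
    rw [show ((fun v => if v = (((l0 :: rest) : List (List Char)).length : Int) then (1 : Int) else 0) ∘
          (fun k => (((l0 :: rest).flatMap PySem.List.dedup).count k : Int)))
        = (fun k => if (((l0 :: rest).flatMap PySem.List.dedup).count k : Int)
            = (((l0 :: rest) : List (List Char)).length : Int)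
            then (1 : Int) else 0) from rfl, hsum]
    have hA : groupA g = (((rest.map (fun y => PySem.Set.ofList y)).foldl PySem.Set.inter
        (PySem.Set.ofList l0)).length : Int) := by
      simp [groupA, hl]
    rw [hA]
    congr 1
    rw [List.countP_eq_length_filter]
    have hperm : ((rest.map (fun y => PySem.Set.ofList y)).foldl PySem.Set.inter
          (PySem.Set.ofList l0)).Perm
        ((PySem.Set.ofList ((l0 :: rest).flatMap PySem.List.dedup)).filter
          (fun k => decide ((((l0 :: rest).flatMap PySem.List.dedup).count k : Int)
            = (((l0 :: rest) : List (List Char)).length : Int)))) := by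
      rw [List.perm_ext_iff_of_nodup
        (nodup_foldl_inter _ _ (PySem.Set.nodup_ofList l0))
        ((PySem.Set.nodup_ofList _).filter _)]
      intro c
      rw [mem_foldl_inter, List.mem_filter]
      simp only [PySem.Set.mem_ofList, List.mem_flatMap, PySem.List.mem_dedup,
        List.forall_mem_map, decide_eq_true_eq, Nat.cast_inj, count_flatMap_dedup,
        List.mem_cons]
      constructor
      · rintro ⟨h0, hall⟩
        have hmem : ∀ l, (l = l0 ∨ l ∈ rest) → c ∈ l := by
          rintro l (rfl | hlm)
          · exact h0
          · exact hall l hlm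
        refine ⟨⟨l0, Or.inl rfl, h0⟩, ?_⟩
        rw [List.countP_eq_length]
        intro l hlm
        simpa using hmem l (by simpa using hlm)
      · rintro ⟨-, hcnt⟩
        rw [List.countP_eq_length] at hcnt
        simp only [decide_eq_true_eq] at hcnt
        exact ⟨hcnt l0 (by simp), fun l hlm => hcnt l (by simp [hlm])⟩
    exact hperm.length_eq

-- ===== VERDICT (by name: the statement is the Claim_ definition above) =====
theorem solution_spec : Claim_equal_solution := by
  intro s _ _
  unfold Spec_solution solution solution_alt
  rw [PySem.List.foldl_add]
  simp [List.map_congr_left (fun g _ => group_eq g)]
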